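-- pv_equiv track=rewrite | github.com/tycyd/codeforces | dfs/1400E Clear the Multiset.py | dfs
-- ===== SOURCE A (Python) =====
-- def dfs(l, r, a_a):
--     if l > r:
--         return 0
--
--     mval = a_a[l]
--     midx = l
--     mx = max(a_a[l - 1], a_a[r + 1])
--
--     for i in range(l, r+1):
--         if mval > a_a[i]:
--             mval = a_a[i]
--             midx = i
--
--     r1 = r - l + 1
--     r2 = mval + dfs(l, midx-1, a_a) + dfs(midx+1, r, a_a) - mx
--
--     return min(r1, r2)
-- ===== SOURCE B (Python) =====
-- def dfs(l, r, a_a):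
--     if l > r:
--         return 0
--     n = len(a_a)
--     size = r - l + 1
--     # sparse table: levels[k][i] = leftmost index of the minimum of a_a[i .. i+2^k-1]
--     levels = [list(range(n))]
--     for k in range(1, size.bit_length()):
--         half = 1 << (k - 1)
--         prev = levels[-1]
--         levels.append([prev[i] if a_a[prev[i]] <= a_a[prev[i + half]] else prev[i + half]
--                        for i in range(n - 2 * half + 1)])
--
--     def argmin(lo, hi):
--         k = (hi - lo + 1).bit_length() - 1
--         i, j = levels[k][lo], levels[k][hi + 1 - (1 << k)]
--         return i if a_a[i] <= a_a[j] else j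
--
--     def solve(lo, hi):
--         if lo > hi:
--             return 0
--         m = argmin(lo, hi)
--         full = a_a[m] + solve(lo, m - 1) + solve(m + 1, hi) - max(a_a[lo - 1], a_a[hi + 1])
--         return min(hi - lo + 1, full)
--
--     return solve(l, r)
-- ===== Notes on version B (the rewrite author's own statement) =====
-- stated objective: alternative
-- what changed: B replaces A's O(length) minimum re-scan inside every recursive call by a sparse-table RMQ (leftmost-min index) built once, answering each split point in O(1) over the same divide-and-conquer recursion.
-- outside the precondition, e.g. on dfs(-1, -1, [2, 5]): A returns 1, B raises IndexError; on dfs(-1, 0, [2, 5]): A returns -2, B raises RecursionError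
import Mathlib
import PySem

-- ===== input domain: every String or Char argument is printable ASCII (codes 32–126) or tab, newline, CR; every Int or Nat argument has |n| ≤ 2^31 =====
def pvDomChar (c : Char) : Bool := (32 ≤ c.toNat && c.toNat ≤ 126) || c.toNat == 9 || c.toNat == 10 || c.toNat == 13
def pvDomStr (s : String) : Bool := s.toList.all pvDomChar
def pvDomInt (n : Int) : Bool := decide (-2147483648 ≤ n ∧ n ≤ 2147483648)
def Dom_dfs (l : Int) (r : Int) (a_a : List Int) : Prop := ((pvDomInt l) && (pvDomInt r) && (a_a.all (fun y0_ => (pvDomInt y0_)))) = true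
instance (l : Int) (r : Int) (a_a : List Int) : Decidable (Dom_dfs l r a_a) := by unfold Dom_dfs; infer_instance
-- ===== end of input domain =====

-- B replaces A's per-call linear minimum scan by a sparse-table RMQ (leftmost-min index)
-- built once, over the same divide-and-conquer recursion (objective: alternative).

-- xs[i] with Python index semantics; the default 0 is never reached inside Pre_ (indices in range)
def pyAt (xs : List Int) (i : Int) : Int := (PySem.List.pyGet? xs i).getD 0
-- levels[k] (a list of lists); default [] never reached inside Pre_
def pyAtL (xs : List (List Int)) (i : Int) : List Int := (PySem.List.pyGet? xs i).getD []

-- ===== PORT A =====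
-- the recursion is run on fuel (r+1-l).toNat; inside Pre_ the split index stays in [l,r],
-- so sub-segments strictly shrink and the fuel is never exhausted before 'l > r' holds
def dfsA_go (a_a : List Int) : Nat → Int → Int → Int
  | 0, _, _ => 0
  | fuel+1, l, r =>
    if l > r then 0 else
      let mx := max (pyAt a_a (l-1)) (pyAt a_a (r+1))
      let p := (PySem.List.pyRange l (r+1) 1).foldl
        (fun (mv : Int × Int) i => if mv.1 > pyAt a_a i then (pyAt a_a i, i) else mv)
        (pyAt a_a l, l)
      let r1 := r - l + 1
      let r2 := p.1 + dfsA_go a_a fuel l (p.2 - 1) + dfsA_go a_a fuel (p.2 + 1) r - mx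
      min r1 r2

def dfs (l : Int) (r : Int) (a_a : List Int) : Int := dfsA_go a_a (r + 1 - l).toNat l r

-- ===== PORT B =====
-- i if a_a[i] <= a_a[j] else j  (leftmost index of the smaller value)
def combIdx (a_a : List Int) (i j : Int) : Int := if pyAt a_a i ≤ pyAt a_a j then i else j

-- one comprehension step of the table build: half = 2^(k-1)
def bStep (a_a : List Int) (prev : List Int) (half : Int) : List Int :=
  (PySem.List.pyRange 0 ((a_a.length : Int) - 2 * half + 1) 1).map
    (fun i => combIdx a_a (pyAt prev i) (pyAt prev (i + half)))

-- the 'for k in range(1, size.bit_length())' append loop, K = number of iterations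
def bLevels (a_a : List Int) : Nat → List (List Int)
  | 0 => [PySem.List.pyRange 0 (a_a.length : Int) 1]
  | k+1 => let acc := bLevels a_a k
           acc ++ [bStep a_a (pyAtL acc (-1)) ((2 ^ k : Nat) : Int)]

-- (hi-lo+1).bit_length() - 1 is ported as Nat.log2 (hi-lo+1).toNat: exact for hi ≥ lo (size ≥ 1)
def bArgmin (a_a : List Int) (levels : List (List Int)) (lo hi : Int) : Int :=
  let k := (hi - lo + 1).toNat.log2
  combIdx a_a (pyAt (pyAtL levels (k : Int)) lo)
              (pyAt (pyAtL levels (k : Int)) (hi + 1 - ((2 ^ k : Nat) : Int)))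

def dfsB_go (a_a : List Int) (levels : List (List Int)) : Nat → Int → Int → Int
  | 0, _, _ => 0
  | fuel+1, lo, hi =>
    if lo > hi then 0 else
      let m := bArgmin a_a levels lo hi
      let full := pyAt a_a m + dfsB_go a_a levels fuel lo (m - 1)
                  + dfsB_go a_a levels fuel (m + 1) hi
                  - max (pyAt a_a (lo - 1)) (pyAt a_a (hi + 1))
      min (hi - lo + 1) full

def dfs_alt (l : Int) (r : Int) (a_a : List Int) : Int :=
  if l > r then 0 else
    let size := r - l + 1
    -- size.bit_length() - 1 extra levels, i.e. Nat.log2 size.toNat append iterations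
    let levels := bLevels a_a size.toNat.log2
    dfsB_go a_a levels size.toNat l r

-- ===== PRECONDITION & SPEC =====
-- Pre_ excludes inputs with l ≤ r where l is negative or r+1 is not a valid position: there A
-- either raises IndexError or returns a value produced by Python's negative-index wraparound of
-- the recursion bounds themselves, an accident of A's indexing (cites in claim.json).
def Pre_dfs (l : Int) (r : Int) (a_a : List Int) : Prop :=
  r < l ∨ (0 ≤ l ∧ r + 1 < (a_a.length : Int))
instance (l : Int) (r : Int) (a_a : List Int) : Decidable (Pre_dfs l r a_a) := by
  unfold Pre_dfs; infer_instance

def pvWitness_dfs : Int × Int × List Int := (0, 3, [2, 1, 3, 2, 9])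

def Spec_dfs (l : Int) (r : Int) (a_a : List Int) (out : Int) : Prop := out = dfs_alt l r a_a
instance (l : Int) (r : Int) (a_a : List Int) (out : Int) : Decidable (Spec_dfs l r a_a out) := by
  unfold Spec_dfs; infer_instance

-- ===== CLAIM (what is proved, stated in full; the proofs are below) =====
def Claim_equal_dfs : Prop := ∀ (l : Int) (r : Int) (a_a : List Int),
  Dom_dfs l r a_a → Pre_dfs l r a_a → Spec_dfs l r a_a (dfs l r a_a)

-- ===== LEMMAS AND PROOFS =====

-- leftmost argmin of a_a over [lo, lo+sz), as a recursion extending on the right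
def am (a_a : List Int) (lo : Int) : Nat → Int
  | 0 => lo
  | s+1 => combIdx a_a (am a_a lo s) (lo + s)

-- i is THE leftmost minimising index of a_a over [lo, lo+sz)
def isAm (a_a : List Int) (lo : Int) (sz : Nat) (i : Int) : Prop :=
  lo ≤ i ∧ i < lo + sz ∧ (∀ j, lo ≤ j → j < lo + sz → pyAt a_a i ≤ pyAt a_a j) ∧
    (∀ j, lo ≤ j → j < i → pyAt a_a i < pyAt a_a j)

theorem am_isAm (a_a : List Int) (lo : Int) (sz : Nat) (h : 1 ≤ sz) :
    isAm a_a lo sz (am a_a lo sz) := by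
  induction sz with
  | zero => omega
  | succ s ih =>
    by_cases hs : 1 ≤ s
    · obtain ⟨h1, h2, h3, h4⟩ := ih hs
      show isAm a_a lo (s+1) (combIdx a_a (am a_a lo s) (lo + s))
      unfold combIdx
      split
      · exact ⟨h1, by push_cast; omega, fun j hj1 hj2 => by
          by_cases hj : j < lo + s
          · exact h3 j hj1 hj
          · have : j = lo + s := by push_cast at hj2 ⊢; omega
            subst this; assumption, h4⟩
      · rename_i hlt
        push_neg at hlt
        refine ⟨by omega, by push_cast; omega, fun j hj1 hj2 => ?_, fun j hj1 hj2 => ?_⟩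
        · by_cases hj : j < lo + s
          · exact le_of_lt (lt_of_lt_of_le hlt (h3 j hj1 hj))
          · have : j = lo + s := by push_cast at hj2 ⊢; omega
            subst this; exact le_refl _
        · exact lt_of_lt_of_le hlt (h3 j hj1 (by omega))
    · have : s = 0 := by omega
      subst this
      show isAm a_a lo 1 (combIdx a_a (am a_a lo 0) (lo + 0))
      simp only [am, combIdx, add_zero, le_refl, if_true]
      exact ⟨le_refl _, by omega, fun j hj1 hj2 => by
        have : j = lo := by push_cast at hj2; omega
        subst this; exact le_refl _, fun j hj1 hj2 => by omega⟩

theorem isAm_unique (a_a : List Int) (lo : Int) (sz : Nat) (i i' : Int)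
    (h : isAm a_a lo sz i) (h' : isAm a_a lo sz i') : i = i' := by
  obtain ⟨h1, h2, h3, h4⟩ := h
  obtain ⟨h1', h2', h3', h4'⟩ := h'
  rcases lt_trichotomy i i' with hlt | heq | hgt
  · have := h4' i h1 hlt
    have := h3 i' h1' h2'
    omega
  · exact heq
  · have := h4 i' h1' hgt
    have := h3' i h1 h2
    omega

-- union of a prefix block and an (overlapping or adjacent) suffix block
theorem isAm_union (a_a : List Int) (lo lo' : Int) (s t sz : Nat) (i1 i2 : Int)
    (H1 : isAm a_a lo s i1) (H2 : isAm a_a lo' t i2)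
    (hlo : lo ≤ lo') (hcov : lo' ≤ lo + s) (hend : lo + (sz : Int) = lo' + t) (hsz : s ≤ sz) :
    isAm a_a lo sz (combIdx a_a i1 i2) := by
  obtain ⟨a1, a2, a3, a4⟩ := H1
  obtain ⟨b1, b2, b3, b4⟩ := H2
  unfold combIdx
  split
  · -- val i1 ≤ val i2 : result i1
    rename_i hle
    refine ⟨a1, by omega, fun j hj1 hj2 => ?_, fun j hj1 hj2 => a4 j hj1 hj2⟩
    by_cases hj : j < lo + s
    · exact a3 j hj1 hj
    · exact le_trans hle (b3 j (by omega) (by omega))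
  · -- val i2 < val i1 : result i2
    rename_i hlt
    push_neg at hlt
    refine ⟨by omega, by omega, fun j hj1 hj2 => ?_, fun j hj1 hj2 => ?_⟩
    · by_cases hj : j < lo'
      · exact le_of_lt (lt_of_lt_of_le hlt (a3 j hj1 (by omega)))
      · exact b3 j (by omega) (by omega)
    · by_cases hj : j < lo'
      · exact lt_of_lt_of_le hlt (a3 j hj1 (by omega))
      · exact b4 j (by omega) hj2

-- the running-minimum fold over List.range IS am
theorem foldl_comb_range (a_a : List Int) (lo : Int) (sz : Nat) :
    (List.range sz).foldl (fun b (t : Nat) => combIdx a_a b (lo + (t : Int))) lo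
      = am a_a lo sz := by
  induction sz with
  | zero => simp [am]
  | succ s ih => rw [List.range_succ, List.foldl_append, ih]; simp [am]

-- A's (mval, midx) pair fold carries exactly (pyAt of the index fold, the index fold)
theorem pair_fold_eq (a_a : List Int) (xs : List Int) (b : Int) :
    xs.foldl (fun (mv : Int × Int) i => if mv.1 > pyAt a_a i then (pyAt a_a i, i) else mv)
      (pyAt a_a b, b) = (pyAt a_a (xs.foldl (combIdx a_a) b), xs.foldl (combIdx a_a) b) := by
  induction xs generalizing b with
  | nil => rfl
  | cons x xs ih =>
    simp only [List.foldl_cons]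
    rw [show (if pyAt a_a b > pyAt a_a x then (pyAt a_a x, x) else (pyAt a_a b, b))
        = (pyAt a_a (combIdx a_a b x), combIdx a_a b x) by
      unfold combIdx; split <;> split <;> simp_all <;> omega]
    exact ih (combIdx a_a b x)

-- A's scan over range(l, r+1) computes am a_a l (r+1-l).toNat
theorem scan_eq_am (a_a : List Int) (l r : Int) :
    (PySem.List.pyRange l (r+1) 1).foldl
      (fun (mv : Int × Int) i => if mv.1 > pyAt a_a i then (pyAt a_a i, i) else mv)
      (pyAt a_a l, l)
    = (pyAt a_a (am a_a l (r+1-l).toNat), am a_a l (r+1-l).toNat) := by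
  rw [pair_fold_eq, PySem.List.pyRange_one, List.foldl_map, foldl_comb_range]

-- specification of table level k
def levSpec (a_a : List Int) (k : Nat) : List Int :=
  (List.range (a_a.length + 1 - 2 ^ k)).map (fun (i : Nat) => am a_a (i : Int) (2 ^ k))

theorem am_one (a_a : List Int) (lo : Int) : am a_a lo 1 = lo := by
  simp [am, combIdx]

-- indexing a spec level
theorem levSpec_get (a_a : List Int) (k i : Nat) (h : i < a_a.length + 1 - 2^k) :
    pyAt (levSpec a_a k) (i : Int) = am a_a (i : Int) (2^k) := by
  simp [pyAt, levSpec, h]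

theorem levSpec_get' (a_a : List Int) (k : Nat) (i : Int) (h0 : 0 ≤ i)
    (h : i + ((2^k : Nat) : Int) ≤ (a_a.length : Int)) :
    pyAt (levSpec a_a k) i = am a_a i (2^k) := by
  have hp : 1 ≤ (2:Nat)^k := Nat.one_le_two_pow
  have hi : i = ((i.toNat : Nat) : Int) := by omega
  rw [hi, levSpec_get]
  omega

-- joining two am blocks with combIdx
theorem comb_am_am (a_a : List Int) (lo lo' : Int) (s t sz : Nat)
    (hs : 1 ≤ s) (ht : 1 ≤ t) (hlo : lo ≤ lo') (hcov : lo' ≤ lo + s)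
    (hend : lo + (sz : Int) = lo' + t) (hsz : s ≤ sz) :
    combIdx a_a (am a_a lo s) (am a_a lo' t) = am a_a lo sz := by
  exact isAm_unique a_a lo sz _ _
    (isAm_union a_a lo lo' s t sz _ _ (am_isAm a_a lo s hs) (am_isAm a_a lo' t ht)
      hlo hcov hend hsz)
    (am_isAm a_a lo sz (by omega))

theorem bStep_eq (a_a : List Int) (K : Nat) :
    bStep a_a (levSpec a_a K) ((2^K : Nat) : Int) = levSpec a_a (K+1) := by
  have hn2 : (2:Nat)^(K+1) = 2^K + 2^K := by ring
  have hp : 1 ≤ (2:Nat)^K := Nat.one_le_two_pow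
  have hm : ((a_a.length : Int) - 2 * ((2^K : Nat) : Int) + 1).toNat
      = a_a.length + 1 - 2^(K+1) := by omega
  unfold bStep
  rw [PySem.List.pyRange_zero, hm, List.map_map]
  show _ = (List.range (a_a.length + 1 - 2^(K+1))).map (fun (i : Nat) => am a_a (i : Int) (2^(K+1)))
  apply List.map_congr_left
  intro i hi
  simp only [List.mem_range] at hi
  simp only [Function.comp_apply]
  have e1 : pyAt (levSpec a_a K) (i : Int) = am a_a (i : Int) (2^K) :=
    levSpec_get' a_a K i (by omega) (by omega)
  have ecast : (i : Int) + ((2^K : Nat) : Int) = ((i + 2^K : Nat) : Int) := by push_cast; ring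
  have e2 : pyAt (levSpec a_a K) ((i : Int) + ((2^K : Nat) : Int))
      = am a_a ((i : Int) + ((2^K : Nat) : Int)) (2^K) := by
    rw [ecast, levSpec_get]
    omega
  rw [e1, e2, comb_am_am a_a (i : Int) ((i : Int) + ((2^K : Nat) : Int)) (2^K) (2^K) (2^(K+1))
    hp hp (by omega) (by omega) (by omega) (by omega)]

theorem bLevels_eq (a_a : List Int) (K : Nat) :
    bLevels a_a K = (List.range (K+1)).map (levSpec a_a) := by
  induction K with
  | zero =>
    show [PySem.List.pyRange 0 (a_a.length : Int) 1] = _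
    rw [PySem.List.pyRange_zero]
    simp [levSpec, am_one]
  | succ K ih =>
    show bLevels a_a K ++ [bStep a_a (pyAtL (bLevels a_a K) (-1)) ((2^K : Nat) : Int)] = _
    rw [ih]
    have hlast : pyAtL ((List.range (K+1)).map (levSpec a_a)) (-1) = levSpec a_a K := by
      simp [pyAtL, PySem.List.pyGet?_neg_one, List.range_succ]
    rw [hlast, bStep_eq, show List.range (K+1+1) = List.range (K+1) ++ [K+1] from
      List.range_succ, List.map_append]
    rfl

-- the query of B returns am over [lo, hi] whenever the table is deep enough
theorem bArgmin_eq (a_a : List Int) (K : Nat) (lo hi : Int)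
    (h0 : 0 ≤ lo) (h1 : lo ≤ hi) (h2 : hi + 1 < (a_a.length : Int))
    (hK : (hi - lo + 1).toNat.log2 ≤ K) :
    bArgmin a_a (bLevels a_a K) lo hi = am a_a lo (hi + 1 - lo).toNat := by
  have hsz1 : 1 ≤ (hi - lo + 1).toNat := by omega
  have hp1 : 2^(hi - lo + 1).toNat.log2 ≤ (hi - lo + 1).toNat := Nat.log2_self_le (by omega)
  have hp2 : (hi - lo + 1).toNat < 2^((hi - lo + 1).toNat.log2 + 1) := Nat.lt_log2_self
  have hn2 : (2:Nat)^((hi - lo + 1).toNat.log2 + 1) = 2^(hi - lo + 1).toNat.log2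
      + 2^(hi - lo + 1).toNat.log2 := by ring
  have hq : 1 ≤ (2:Nat)^(hi - lo + 1).toNat.log2 := Nat.one_le_two_pow
  simp only [bArgmin]
  rw [bLevels_eq]
  have hlev : pyAtL ((List.range (K+1)).map (levSpec a_a)) ((hi - lo + 1).toNat.log2 : Int)
      = levSpec a_a (hi - lo + 1).toNat.log2 := by
    simp [pyAtL, PySem.List.pyGet?_natCast, Nat.lt_succ_of_le hK]
  rw [hlev]
  rw [levSpec_get' a_a _ lo h0 (by omega)]
  rw [levSpec_get' a_a _ (hi + 1 - ((2^(hi - lo + 1).toNat.log2 : Nat) : Int)) (by omega) (by omega)]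
  rw [comb_am_am a_a lo (hi + 1 - ((2^(hi - lo + 1).toNat.log2 : Nat) : Int))
    (2^(hi - lo + 1).toNat.log2) (2^(hi - lo + 1).toNat.log2) (hi + 1 - lo).toNat
    hq hq (by omega) (by omega) (by omega) (by omega)]

-- the two recursions agree step for step once the split indices agree
theorem go_eq (a_a : List Int) (K : Nat) (top : Int) (hKtop : K = top.toNat.log2)
    (fuel : Nat) : ∀ lo hi : Int,
    (hi < lo ∨ (0 ≤ lo ∧ hi + 1 < (a_a.length : Int) ∧ hi - lo + 1 ≤ top)) →
    dfsA_go a_a fuel lo hi = dfsB_go a_a (bLevels a_a K) fuel lo hi := by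
  induction fuel with
  | zero => intro lo hi _; rfl
  | succ fuel ih =>
    intro lo hi h
    by_cases hlh : hi < lo
    · show dfsA_go _ (fuel+1) lo hi = dfsB_go _ _ (fuel+1) lo hi
      simp [dfsA_go, dfsB_go, show lo > hi from hlh]
    · have hle : lo ≤ hi := by omega
      rcases h with h | ⟨h0, h1, h2⟩
      · omega
      have hKle : (hi - lo + 1).toNat.log2 ≤ K := by
        rw [hKtop]
        simp only [Nat.log2_eq_log_two]
        exact Nat.log_mono_right (by omega)
      have hq := bArgmin_eq a_a K lo hi h0 hle h1 hKle
      obtain ⟨hM1, hM2, -, -⟩ := am_isAm a_a lo (hi + 1 - lo).toNat (by omega)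
      have hcast : ((hi + 1 - lo).toNat : Int) = hi + 1 - lo := by omega
      have hM2' : am a_a lo (hi + 1 - lo).toNat ≤ hi := by omega
      show dfsA_go _ (fuel+1) lo hi = dfsB_go _ _ (fuel+1) lo hi
      simp only [dfsA_go, dfsB_go, if_neg (show ¬ lo > hi by omega)]
      rw [scan_eq_am a_a lo hi, hq]
      rw [ih lo (am a_a lo (hi + 1 - lo).toNat - 1) (Or.inr ⟨h0, by omega, by omega⟩)]
      rw [ih (am a_a lo (hi + 1 - lo).toNat + 1) hi (by
        by_cases hc : hi < am a_a lo (hi + 1 - lo).toNat + 1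
        · exact Or.inl hc
        · exact Or.inr ⟨by omega, by omega, by omega⟩)]

-- ===== VERDICT (by name: the statement is the Claim_ definition above) =====
theorem dfs_spec : Claim_equal_dfs := by
  intro l r a_a _hdom hpre
  show dfs l r a_a = dfs_alt l r a_a
  by_cases hlr : l > r
  · have hfuel : (r + 1 - l).toNat = 0 := by omega
    simp [dfs, dfs_alt, hfuel, hlr, dfsA_go]
  · push_neg at hlr
    rcases hpre with h | ⟨h0, h1⟩
    · omega
    · have hK : (r - l + 1).toNat.log2 = (r - l + 1).toNat.log2 := rfl
      have := go_eq a_a ((r - l + 1).toNat.log2) (r - l + 1) rfl ((r + 1 - l).toNat) l r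
        (Or.inr ⟨h0, h1, le_refl _⟩)
      simp only [dfs, dfs_alt, if_neg (by omega : ¬ l > r)]
      rw [show (r + 1 - l).toNat = (r - l + 1).toNat by omega] at this ⊢
      exact this
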